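-- pv_equiv track=rewrite | github.com/yacoublambaz/EECE230PssSpring2022 | quiz1.py | partBWhichsNameIsTooLong
-- ===== SOURCE A (Python) =====
-- def atMostTwoZeros(L):
--     """
--     Guilty until proven innocent, all lists have at most two zeroes until proven otherwise.
--     They prove otherwise by having... you know... more than two zeros :D
--     """
--     count = 0
--     for elem in L:
--         if elem == 0:
--             count += 1
--             if count > 2:
--                 return False
--     return True
--
-- def partBWhichsNameIsTooLong(L):
--     """
--     The longest ____ sublist formula!
--     """
--     maxLen = 0
--     maxSub = []
--     for i in range(len(L)):
--         for j in range(i,len(L)):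
--             subL = L[i:j+1]
--             if atMostTwoZeros(subL):
--                 if len(subL) > maxLen:
--                     maxLen = len(subL)
--                     maxSub = subL
--     return maxSub
-- ===== SOURCE B (Python) =====
-- def partBWhichsNameIsTooLong(L):
--     # For each start index, extend once to the furthest end with at most two
--     # zeros (prefix-closed, so a single scan suffices); keep the first strictly
--     # longer window; O(n^2) instead of A's O(n^3).
--     n = len(L)
--     best_s = 0
--     best_e = 0
--     for i in range(n):
--         zeros = 0
--         j = i
--         while j < n:
--             if L[j] == 0:
--                 zeros += 1
--                 if zeros > 2:
--                     break
--             j += 1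
--         if j - i > best_e - best_s:
--             best_s, best_e = i, j
--     return L[best_s:best_e]
-- ===== Notes on version B (the rewrite author's own statement) =====
-- stated objective: faster
-- what changed: Instead of testing every sublist L[i:j+1] with a fresh zero-counting pass, B scans once from each start index to the furthest end with at most two zeros (validity is prefix-closed) and keeps only window indices, slicing once at the end.
import Mathlib
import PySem

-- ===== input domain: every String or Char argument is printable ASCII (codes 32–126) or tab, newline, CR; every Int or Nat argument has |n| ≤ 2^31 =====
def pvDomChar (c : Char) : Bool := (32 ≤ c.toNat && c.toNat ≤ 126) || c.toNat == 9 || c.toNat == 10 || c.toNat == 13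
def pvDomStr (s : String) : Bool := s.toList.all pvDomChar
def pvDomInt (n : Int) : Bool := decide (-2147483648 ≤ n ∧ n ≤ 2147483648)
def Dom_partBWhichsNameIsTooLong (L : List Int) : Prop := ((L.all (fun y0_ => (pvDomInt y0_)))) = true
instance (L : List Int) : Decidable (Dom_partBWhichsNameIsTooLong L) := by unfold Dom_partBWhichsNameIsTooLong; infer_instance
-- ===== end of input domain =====

-- B replaces A's test-every-sublist O(n^3) scan by one furthest-end scan per start index (O(n^2)); return values are proved identical.

-- ===== PORT A =====
-- helper atMostTwoZeros: the early-return loop carried in the running count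
def atMostTwoZerosGo (count : Nat) : List Int → Bool
  | [] => true
  | x :: xs =>
      if x == 0 then
        if count + 1 > 2 then false else atMostTwoZerosGo (count + 1) xs
      else atMostTwoZerosGo count xs

def atMostTwoZeros (L : List Int) : Bool := atMostTwoZerosGo 0 L

def partBWhichsNameIsTooLong (L : List Int) : List Int :=
  let n := L.length
  ((List.range n).foldl (fun (s : Nat × List Int) i =>
      (List.range' i (n - i)).foldl (fun (s : Nat × List Int) j =>
          let subL := (L.drop i).take (j + 1 - i)   -- L[i:j+1], nonnegative bounds
          if atMostTwoZeros subL then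
            if subL.length > s.1 then (subL.length, subL) else s
          else s) s) ((0 : Nat), ([] : List Int))).2

-- ===== PORT B =====
-- the inner while loop: advance j until a third zero (or the end); returns the final j
def scanEnd (L : List Int) (n j zeros : Nat) : Nat :=
  if h : j < n then
    if L.getD j 0 == 0 then
      if zeros + 1 > 2 then j else scanEnd L n (j + 1) (zeros + 1)
    else scanEnd L n (j + 1) zeros
  else j
termination_by n - j

def partBWhichsNameIsTooLong_alt (L : List Int) : List Int :=
  let n := L.length
  let p := (List.range n).foldl (fun (p : Nat × Nat) i =>
      let j := scanEnd L n i 0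
      if j - i > p.2 - p.1 then (i, j) else p) ((0 : Nat), (0 : Nat))
  (L.drop p.1).take (p.2 - p.1)   -- L[best_s:best_e], nonnegative bounds

-- ===== PRECONDITION & SPEC =====
def Spec_partBWhichsNameIsTooLong (L : List Int) (out : List Int) : Prop := out = partBWhichsNameIsTooLong_alt L
instance (L : List Int) (out : List Int) : Decidable (Spec_partBWhichsNameIsTooLong L out) := by unfold Spec_partBWhichsNameIsTooLong; infer_instance

-- ===== CLAIM (what is proved, stated in full; the proofs are below) =====
def Claim_equal_partBWhichsNameIsTooLong : Prop := ∀ (L : List Int), Dom_partBWhichsNameIsTooLong L → Spec_partBWhichsNameIsTooLong L (partBWhichsNameIsTooLong L)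

-- ===== LEMMAS AND PROOFS =====

-- atMostTwoZeros is "count of zeros ≤ 2"
lemma atMostTwoZerosGo_eq (c : Nat) (xs : List Int) (hc : c ≤ 2) :
    atMostTwoZerosGo c xs = decide (c + xs.count 0 ≤ 2) := by
  induction xs generalizing c with
  | nil => simp [atMostTwoZerosGo, hc]
  | cons x xs ih =>
      by_cases hx : x = 0
      · subst hx
        by_cases h2 : c + 1 > 2
        · simp [atMostTwoZerosGo, h2]
          omega
        · have : c + 1 ≤ 2 := by omega
          simp [atMostTwoZerosGo, h2, ih (c + 1) this]
          constructor <;> intro h <;> omega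
      · simp [atMostTwoZerosGo, hx, ih c hc]

lemma atMostTwoZeros_eq (xs : List Int) :
    atMostTwoZeros xs = decide (xs.count 0 ≤ 2) := by
  simpa using atMostTwoZerosGo_eq 0 xs (by omega)

lemma count_take_mono (xs : List Int) {a b : Nat} (h : a ≤ b) :
    (xs.take a).count 0 ≤ (xs.take b).count 0 := by
  have he : xs.take a = (xs.take b).take a := by
    rw [List.take_take, Nat.min_eq_left h]
  rw [he]
  exact ((xs.take b).take_sublist a).count_le 0

-- specification of scanEnd: it reaches the furthest end keeping zeros + count ≤ 2
lemma scanEnd_spec (L : List Int) (j z : Nat) (hj : j ≤ L.length) (hz : z ≤ 2) :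
    j ≤ scanEnd L L.length j z ∧ scanEnd L L.length j z ≤ L.length ∧
      z + ((L.drop j).take (scanEnd L L.length j z - j)).count 0 ≤ 2 ∧
      (scanEnd L L.length j z < L.length →
        2 < z + ((L.drop j).take (scanEnd L L.length j z - j + 1)).count 0) := by
  by_cases h : j < L.length
  · have hdrop : L.drop j = L[j] :: L.drop (j + 1) := List.drop_eq_getElem_cons h
    by_cases hx : L[j] = 0
    · by_cases h2 : z + 1 > 2
      · have hse : scanEnd L L.length j z = j := by
          rw [scanEnd]; simp [h, hx, h2]
        refine ⟨le_of_eq hse.symm, by omega, ?_, ?_⟩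
        · rw [hse]; simp; omega
        · intro _
          rw [hse]; simp [hdrop, hx]; omega
      · have hse : scanEnd L L.length j z = scanEnd L L.length (j + 1) (z + 1) := by
          rw [scanEnd]; simp [h, hx, h2]
        obtain ⟨ih1, ih2, ih3, ih4⟩ := scanEnd_spec L (j + 1) (z + 1) (by omega) (by omega)
        rw [hse]
        set t := scanEnd L L.length (j + 1) (z + 1) with ht
        have h1 : t - j = (t - (j + 1)) + 1 := by omega
        have h1' : t - j + 1 = (t - (j + 1) + 1) + 1 := by omega
        refine ⟨by omega, ih2, ?_, ?_⟩
        · rw [h1, hdrop, List.take_succ_cons, List.count_cons]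
          simp [hx]; omega
        · intro hlt
          have := ih4 hlt
          rw [h1', hdrop, List.take_succ_cons, List.count_cons]
          simp [hx]; omega
    · have hse : scanEnd L L.length j z = scanEnd L L.length (j + 1) z := by
        rw [scanEnd]; simp [h, hx]
      obtain ⟨ih1, ih2, ih3, ih4⟩ := scanEnd_spec L (j + 1) z (by omega) hz
      rw [hse]
      set t := scanEnd L L.length (j + 1) z with ht
      have h1 : t - j = (t - (j + 1)) + 1 := by omega
      have h1' : t - j + 1 = (t - (j + 1) + 1) + 1 := by omega
      refine ⟨by omega, ih2, ?_, ?_⟩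
      · rw [h1, hdrop, List.take_succ_cons, List.count_cons]
        simp [hx]; omega
      · intro hlt
        have := ih4 hlt
        rw [h1', hdrop, List.take_succ_cons, List.count_cons]
        simp [hx]; omega
  · have hse : scanEnd L L.length j z = j := by
      rw [scanEnd]; simp [h]
    rw [hse]
    refine ⟨le_refl j, by omega, by simp; omega, by omega⟩
termination_by L.length - j

-- validity of the window L[i:e) is exactly e ≤ scanEnd
lemma valid_iff (L : List Int) (i e : Nat) (hie : i ≤ e) (he : e ≤ L.length) :
    (atMostTwoZeros ((L.drop i).take (e - i)) = true) ↔ e ≤ scanEnd L L.length i 0 := by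
  obtain ⟨h1, h2, h3, h4⟩ := scanEnd_spec L i 0 (by omega) (by omega)
  set t := scanEnd L L.length i 0 with ht
  rw [atMostTwoZeros_eq, decide_eq_true_iff]
  constructor
  · intro hc
    by_contra hgt
    rw [not_le] at hgt
    have hlt : t < L.length := by omega
    have := h4 hlt
    have hmono : ((L.drop i).take (t - i + 1)).count 0 ≤ ((L.drop i).take (e - i)).count 0 :=
      count_take_mono _ (by omega)
    omega
  · intro hle
    have hmono : ((L.drop i).take (e - i)).count 0 ≤ ((L.drop i).take (t - i)).count 0 :=
      count_take_mono _ (by omega)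
    omega

-- A's inner loop over j ∈ [k, n): picks the longest valid window from i iff it beats s.1
lemma inner_fold_eq (L : List Int) (i k : Nat) (hik : i ≤ k) (hk : k ≤ L.length)
    (s : Nat × List Int) :
    ((List.range' k (L.length - k)).foldl (fun (s : Nat × List Int) j =>
        let subL := (L.drop i).take (j + 1 - i)
        if atMostTwoZeros subL then
          if subL.length > s.1 then (subL.length, subL) else s
        else s) s)
    = (if k < scanEnd L L.length i 0 ∧ scanEnd L L.length i 0 - i > s.1 then
        (scanEnd L L.length i 0 - i, (L.drop i).take (scanEnd L L.length i 0 - i))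
      else s) := by
  obtain ⟨hti, htn, -, -⟩ := scanEnd_spec L i 0 (by omega) (by omega)
  set t := scanEnd L L.length i 0 with ht
  by_cases h : k < L.length
  · have hrange : List.range' k (L.length - k) = k :: List.range' (k + 1) (L.length - (k + 1)) := by
      have : L.length - k = (L.length - (k + 1)) + 1 := by omega
      rw [this, List.range'_succ]
    rw [hrange, List.foldl_cons]
    have hlen : ((L.drop i).take (k + 1 - i)).length = k + 1 - i := by
      simp [List.length_take, List.length_drop]; omega
    have hvalid := valid_iff L i (k + 1) (by omega) (by omega)
    by_cases hkt : k < t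
    · have hv : atMostTwoZeros ((L.drop i).take (k + 1 - i)) = true := hvalid.mpr (by omega)
      by_cases hbeat : k + 1 - i > s.1
      · rw [show (if atMostTwoZeros ((L.drop i).take (k + 1 - i)) then
            if ((L.drop i).take (k + 1 - i)).length > s.1 then
              (((L.drop i).take (k + 1 - i)).length, (L.drop i).take (k + 1 - i)) else s
          else s) = ((k + 1 - i, (L.drop i).take (k + 1 - i)) : Nat × List Int) by
            simp [hv, hlen, hbeat]]
        rw [inner_fold_eq L i (k + 1) (by omega) (by omega) _, ← ht]
        split_ifs <;>
          first
          | rfl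
          | (exfalso; omega)
          | (exact congrArg (fun m => ((m - i : Nat), List.take (m - i) (List.drop i L)))
              (by omega : (k + 1 : Nat) = t))
      · rw [show (if atMostTwoZeros ((L.drop i).take (k + 1 - i)) then
            if ((L.drop i).take (k + 1 - i)).length > s.1 then
              (((L.drop i).take (k + 1 - i)).length, (L.drop i).take (k + 1 - i)) else s
          else s) = s by simp [hv, hlen]; omega]
        rw [inner_fold_eq L i (k + 1) (by omega) (by omega) s, ← ht]
        split_ifs <;>
          first
          | rfl
          | (exfalso; omega)
    · have hv : atMostTwoZeros ((L.drop i).take (k + 1 - i)) = false := by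
        rw [← Bool.not_eq_true]
        intro hc
        exact absurd (hvalid.mp hc) (by omega)
      rw [show (if atMostTwoZeros ((L.drop i).take (k + 1 - i)) then
            if ((L.drop i).take (k + 1 - i)).length > s.1 then
              (((L.drop i).take (k + 1 - i)).length, (L.drop i).take (k + 1 - i)) else s
          else s) = s by simp [hv]]
      rw [inner_fold_eq L i (k + 1) (by omega) (by omega) s, ← ht]
      rw [if_neg (by omega), if_neg (by omega)]
  · have hnil : L.length - k = 0 := by omega
    have : ¬ (k < t) := by omega
    simp [hnil, this]
termination_by L.length - k

-- the two outer folds, related state by state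
lemma outer_fold_rel (L : List Int) (l : List Nat)
    (hl : ∀ i ∈ l, i < L.length)
    (s : Nat × List Int) (p : Nat × Nat)
    (hrel : p.1 ≤ p.2 ∧ p.2 ≤ L.length ∧ s.1 = p.2 - p.1 ∧ s.2 = (L.drop p.1).take (p.2 - p.1)) :
    let resA := l.foldl (fun (s : Nat × List Int) i =>
        (List.range' i (L.length - i)).foldl (fun (s : Nat × List Int) j =>
            let subL := (L.drop i).take (j + 1 - i)
            if atMostTwoZeros subL then
              if subL.length > s.1 then (subL.length, subL) else s
            else s) s) s
    let resB := l.foldl (fun (p : Nat × Nat) i =>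
        let j := scanEnd L L.length i 0
        if j - i > p.2 - p.1 then (i, j) else p) p
    resA.1 = resB.2 - resB.1 ∧ resA.2 = (L.drop resB.1).take (resB.2 - resB.1) ∧
      resB.1 ≤ resB.2 ∧ resB.2 ≤ L.length := by
  induction l generalizing s p with
  | nil => exact ⟨hrel.2.2.1, hrel.2.2.2, hrel.1, hrel.2.1⟩
  | cons i l ih =>
      have hi : i < L.length := hl i (List.mem_cons_self)
      have hl' : ∀ x ∈ l, x < L.length := fun x hx => hl x (List.mem_cons_of_mem _ hx)
      simp only [List.foldl_cons]
      obtain ⟨hti, htn, -, -⟩ := scanEnd_spec L i 0 (by omega) (by omega)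
      set t := scanEnd L L.length i 0 with ht
      rw [inner_fold_eq L i i (le_refl i) (by omega) s]
      obtain ⟨hp1, hp2, hs1, hs2⟩ := hrel
      by_cases hcond : t - i > p.2 - p.1
      · have hc1 : i < t ∧ t - i > s.1 := by omega
        have hc2 : (if t - i > p.2 - p.1 then (i, t) else p) = (i, t) := by simp [hcond]
        rw [if_pos hc1, hc2]
        exact ih hl' _ _ ⟨by omega, by omega, rfl, rfl⟩
      · have hc1 : ¬ (i < t ∧ t - i > s.1) := by omega
        have hc2 : (if t - i > p.2 - p.1 then (i, t) else p) = p := by simp [hcond]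
        rw [if_neg hc1, hc2]
        exact ih hl' s p ⟨hp1, hp2, hs1, hs2⟩

-- ===== VERDICT (by name: the statement is the Claim_ definition above) =====
theorem partBWhichsNameIsTooLong_spec : Claim_equal_partBWhichsNameIsTooLong := by
  intro L _
  unfold Spec_partBWhichsNameIsTooLong partBWhichsNameIsTooLong partBWhichsNameIsTooLong_alt
  have h := outer_fold_rel L (List.range L.length)
    (fun i hi => List.mem_range.mp hi)
    ((0 : Nat), ([] : List Int)) ((0 : Nat), (0 : Nat))
    ⟨le_refl 0, Nat.zero_le _, by simp, by simp⟩
  simpa using h.2.1
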